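-- pv_equiv track=rewrite | github.com/NicholasJohansan/MiniProjects | Games/chess.py | get_all_possible_tiles
-- ===== SOURCE A (Python) =====
-- def get_all_possible_tiles(current_tile):
-- 	possible_moves = {
-- 		"ne": [],
-- 		"se": [],
-- 		"sw": [],
-- 		"nw": []
-- 	}
-- 	for key in possible_moves.keys():
-- 		func = {
-- 			"ne": lambda row, col: (row-1, col+1),
-- 			"se": lambda row, col: (row+1, col+1),
-- 			"sw": lambda row, col: (row+1, col-1),
-- 			"nw": lambda row, col: (row-1, col-1)
-- 		}.get(key)
-- 		row, col = current_tile
-- 		while not (row <= 0 or row >= 7 or col <= 0 or col >= 7):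
-- 			row, col = func(row, col)
-- 			possible_moves[key].append((row, col))
-- 	return possible_moves
-- ===== SOURCE B (Python) =====
-- def get_all_possible_tiles(current_tile):
-- 	row, col = current_tile
-- 	if not (1 <= row <= 6 and 1 <= col <= 6):
-- 		return {"ne": [], "se": [], "sw": [], "nw": []}
-- 	return {
-- 		"ne": [(row - i, col + i) for i in range(1, min(row, 7 - col) + 1)],
-- 		"se": [(row + i, col + i) for i in range(1, min(7 - row, 7 - col) + 1)],
-- 		"sw": [(row + i, col - i) for i in range(1, min(7 - row, col) + 1)],
-- 		"nw": [(row - i, col - i) for i in range(1, min(row, col) + 1)],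
-- 	}
-- ===== Notes on version B (the rewrite author's own statement) =====
-- stated objective: simpler
-- what changed: Replaces the four step-until-edge while-loops by a closed-form count of tiles per direction (min of the distances to the two stopping edges) and a single comprehension generating each diagonal.
import Mathlib
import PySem

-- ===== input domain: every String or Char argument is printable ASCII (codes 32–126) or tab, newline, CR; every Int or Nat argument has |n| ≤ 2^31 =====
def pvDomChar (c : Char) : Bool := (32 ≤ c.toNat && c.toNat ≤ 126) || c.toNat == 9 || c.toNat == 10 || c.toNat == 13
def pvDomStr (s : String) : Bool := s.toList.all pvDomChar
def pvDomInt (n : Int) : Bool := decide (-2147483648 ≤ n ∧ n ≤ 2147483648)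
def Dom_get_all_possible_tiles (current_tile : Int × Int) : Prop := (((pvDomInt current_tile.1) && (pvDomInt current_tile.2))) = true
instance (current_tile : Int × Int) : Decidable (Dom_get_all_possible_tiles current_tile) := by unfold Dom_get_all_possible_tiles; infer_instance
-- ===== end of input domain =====

-- B replaces A's four step-until-edge while-loops by closed-form per-direction tile counts
-- (min distance to the stopping edges) plus comprehensions: simpler, same cost.


-- ===== PORT A =====
-- A's while-loop for one direction func; fuel is only a totality guard (the guard confines
-- row to 1..6 and each step moves row by 1, so the loop runs at most 6 iterations)
def pvLoopA (f : Int → Int → Int × Int) (fuel : Nat) (row col : Int)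
    (acc : List (Int × Int)) : List (Int × Int) :=
  match fuel with
  | 0 => acc
  | fuel + 1 =>
    if row ≤ 0 ∨ 7 ≤ row ∨ col ≤ 0 ∨ 7 ≤ col then acc
    else
      let p := f row col
      pvLoopA f fuel p.1 p.2 (acc ++ [p])

def get_all_possible_tiles (current_tile : Int × Int) : List (String × List (Int × Int)) :=
  [ ("ne", pvLoopA (fun row col => (row - 1, col + 1)) 8 current_tile.1 current_tile.2 [])
  , ("se", pvLoopA (fun row col => (row + 1, col + 1)) 8 current_tile.1 current_tile.2 [])
  , ("sw", pvLoopA (fun row col => (row + 1, col - 1)) 8 current_tile.1 current_tile.2 [])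
  , ("nw", pvLoopA (fun row col => (row - 1, col - 1)) 8 current_tile.1 current_tile.2 []) ]

-- ===== PORT B =====
def get_all_possible_tiles_alt (current_tile : Int × Int) : List (String × List (Int × Int)) :=
  let row := current_tile.1
  let col := current_tile.2
  if 1 ≤ row ∧ row ≤ 6 ∧ 1 ≤ col ∧ col ≤ 6 then
    [ ("ne", (PySem.List.pyRange 1 (min row (7 - col) + 1) 1).map (fun i => (row - i, col + i)))
    , ("se", (PySem.List.pyRange 1 (min (7 - row) (7 - col) + 1) 1).map (fun i => (row + i, col + i)))
    , ("sw", (PySem.List.pyRange 1 (min (7 - row) col + 1) 1).map (fun i => (row + i, col - i)))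
    , ("nw", (PySem.List.pyRange 1 (min row col + 1) 1).map (fun i => (row - i, col - i))) ]
  else [("ne", []), ("se", []), ("sw", []), ("nw", [])]

-- ===== PRECONDITION & SPEC =====
def Spec_get_all_possible_tiles (current_tile : Int × Int) (out : List (String × List (Int × Int))) : Prop := out = get_all_possible_tiles_alt current_tile
instance (current_tile : Int × Int) (out : List (String × List (Int × Int))) : Decidable (Spec_get_all_possible_tiles current_tile out) := by unfold Spec_get_all_possible_tiles; infer_instance

-- ===== CLAIM (what is proved, stated in full; the proofs are below) =====
def Claim_equal_get_all_possible_tiles : Prop := ∀ (current_tile : Int × Int), Dom_get_all_possible_tiles current_tile → Spec_get_all_possible_tiles current_tile (get_all_possible_tiles current_tile)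

-- ===== LEMMAS AND PROOFS =====

-- A's loop with step (s, t), run from (row, col) until the guard fires, appends exactly the
-- n tiles (row + s*(k+1), col + t*(k+1)), k = 0..n-1, where n is the number of interior steps.
lemma pvLoopA_eq_range (s t : Int) : ∀ (fuel : Nat) (row col : Int) (n : Nat)
    (acc : List (Int × Int)), n ≤ fuel →
    (∀ k : Nat, k < n → ¬(row + s*k ≤ 0 ∨ 7 ≤ row + s*k ∨ col + t*k ≤ 0 ∨ 7 ≤ col + t*k)) →
    (row + s*n ≤ 0 ∨ 7 ≤ row + s*n ∨ col + t*n ≤ 0 ∨ 7 ≤ col + t*n) →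
    pvLoopA (fun r c => (r + s, c + t)) fuel row col acc
      = acc ++ (List.range n).map (fun (k : Nat) => (row + s*((k:Int)+1), col + t*((k:Int)+1))) := by
  intro fuel
  induction fuel with
  | zero =>
    intro row col n acc hn _ _
    interval_cases n
    simp [pvLoopA]
  | succ f ih =>
    intro row col n acc hn hin hout
    match n with
    | 0 =>
      have hg : row ≤ 0 ∨ 7 ≤ row ∨ col ≤ 0 ∨ 7 ≤ col := by simpa using hout
      simp [pvLoopA, hg]
    | Nat.succ m =>
      have hg : ¬(row ≤ 0 ∨ 7 ≤ row ∨ col ≤ 0 ∨ 7 ≤ col) := by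
        have := hin 0 (by omega); simpa using this
      rw [pvLoopA, if_neg hg]
      rw [ih (row + s) (col + t) m (acc ++ [(row + s, col + t)]) (by omega)
        (fun k hk => by
          have h2 := hin (k+1) (by omega)
          have e1 : row + s + s*(k:Int) = row + s*(((k+1:Nat)):Int) := by push_cast; ring
          have e2 : col + t + t*(k:Int) = col + t*(((k+1:Nat)):Int) := by push_cast; ring
          rw [e1, e2]; exact h2)
        (by
          have e1 : row + s + s*(m:Int) = row + s*(((m+1:Nat)):Int) := by push_cast; ring
          have e2 : col + t + t*(m:Int) = col + t*(((m+1:Nat)):Int) := by push_cast; ring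
          rw [e1, e2]; exact hout)]
      rw [List.range_succ_eq_map]
      simp only [List.map_cons, List.map_map, List.append_assoc, List.cons_append,
        List.nil_append, Nat.cast_zero]
      congr 2
      · push_cast; ring_nf
      · apply List.map_congr_left; intro k _
        simp only [Function.comp_apply, Nat.succ_eq_add_one, Prod.mk.injEq]
        constructor <;> (push_cast; ring)

-- ===== VERDICT (by name: the statement is the Claim_ definition above) =====
theorem get_all_possible_tiles_spec : Claim_equal_get_all_possible_tiles := by
  intro ct _
  obtain ⟨row, col⟩ := ct
  unfold Spec_get_all_possible_tiles
  by_cases h : 1 ≤ row ∧ row ≤ 6 ∧ 1 ≤ col ∧ col ≤ 6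
  · obtain ⟨h1, h2, h3, h4⟩ := h
    have hne := pvLoopA_eq_range (-1) 1 8 row col (min row (7-col)).toNat []
      (by omega) (by intro k hk; omega) (by omega)
    have hse := pvLoopA_eq_range 1 1 8 row col (min (7-row) (7-col)).toNat []
      (by omega) (by intro k hk; omega) (by omega)
    have hsw := pvLoopA_eq_range 1 (-1) 8 row col (min (7-row) col).toNat []
      (by omega) (by intro k hk; omega) (by omega)
    have hnw := pvLoopA_eq_range (-1) (-1) 8 row col (min row col).toNat []
      (by omega) (by intro k hk; omega) (by omega)
    have efne : (fun (r c : Int) => (r - 1, c + 1)) = (fun (r c : Int) => (r + (-1), c + 1)) := by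
      funext r c; simp [sub_eq_add_neg]
    have efsw : (fun (r c : Int) => (r + 1, c - 1)) = (fun (r c : Int) => (r + 1, c + (-1))) := by
      funext r c; simp [sub_eq_add_neg]
    have efnw : (fun (r c : Int) => (r - 1, c - 1)) = (fun (r c : Int) => (r + (-1), c + (-1))) := by
      funext r c; simp [sub_eq_add_neg]
    simp only [get_all_possible_tiles, get_all_possible_tiles_alt]
    rw [if_pos ⟨h1, h2, h3, h4⟩, efne, efsw, efnw, hne, hse, hsw, hnw]
    simp only [PySem.List.pyRange_one, List.map_map, List.nil_append, add_sub_cancel_right,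
      List.cons.injEq, Prod.mk.injEq, and_true, true_and]
    refine ⟨?_, ?_, ?_, ?_⟩ <;>
      · apply List.map_congr_left; intro k _
        simp only [Function.comp_apply, Prod.mk.injEq]
        constructor <;> ring
  · have hg : row ≤ 0 ∨ 7 ≤ row ∨ col ≤ 0 ∨ 7 ≤ col := by omega
    simp [get_all_possible_tiles, get_all_possible_tiles_alt, pvLoopA, hg, h]
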